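-- pv_equiv track=rewrite | github.com/cvcvcx/backjoon | 프로그래머스/lv1/17681. ［1차］ 비밀지도/［1차］ 비밀지도.py | solution
-- ===== SOURCE A (Python) =====
-- def solution(n, arr1, arr2):
--     answer = [""]*n
--     bin_arr1 = []
--     bin_arr2 = []
--     for num in arr1:
--         bin_ = ""
--         while num>0:
--             bin_ += str(num%2)
--             num = num//2
--         while len(bin_)<n:
--             bin_ += "0"
--         bin_arr1.append(bin_[::-1])
--
--     for num in arr2:
--         bin_ = ""
--         while num>0:
--             bin_ += str(num%2)
--             num = num//2
--         while len(bin_)<n: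
--             bin_ += "0"
--         bin_arr2.append(bin_[::-1])
--
--
--     for i in range(n):
--         for j in range(n):
--             if max(int(bin_arr1[i][j]),int(bin_arr2[i][j])) == 1:
--                 answer[i] += "#"
--             else:
--                 answer[i] += " "
--     return answer
-- ===== SOURCE B (Python) =====
-- def solution(n, arr1, arr2):
--     def bits(a):
--         # binary rendering of a, most-significant digit first ("" when a <= 0)
--         return bits(a // 2) + str(a % 2) if a > 0 else ""
--
--     def row(a, b):
--         sa = bits(a).zfill(n)[:n]
--         sb = bits(b).zfill(n)[:n]
--         return "".join("#" if ca == "1" or cb == "1" else " " for ca, cb in zip(sa, sb))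
--
--     return [row(arr1[i], arr2[i]) for i in range(n)]
-- ===== Notes on version B (the rewrite author's own statement) =====
-- stated objective: idiomatic
-- what changed: A decodes every number LSB-first into a right-padded string it then reverses, stores two full string arrays, and fills the grid with nested index loops that re-parse characters via int() and max(); B renders each number MSB-first recursively, pads with zfill and slices to width n, and builds each row in one pass as a join over zip of the two row strings, with no intermediate arrays and no int()/max() per cell.
import Mathlib
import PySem

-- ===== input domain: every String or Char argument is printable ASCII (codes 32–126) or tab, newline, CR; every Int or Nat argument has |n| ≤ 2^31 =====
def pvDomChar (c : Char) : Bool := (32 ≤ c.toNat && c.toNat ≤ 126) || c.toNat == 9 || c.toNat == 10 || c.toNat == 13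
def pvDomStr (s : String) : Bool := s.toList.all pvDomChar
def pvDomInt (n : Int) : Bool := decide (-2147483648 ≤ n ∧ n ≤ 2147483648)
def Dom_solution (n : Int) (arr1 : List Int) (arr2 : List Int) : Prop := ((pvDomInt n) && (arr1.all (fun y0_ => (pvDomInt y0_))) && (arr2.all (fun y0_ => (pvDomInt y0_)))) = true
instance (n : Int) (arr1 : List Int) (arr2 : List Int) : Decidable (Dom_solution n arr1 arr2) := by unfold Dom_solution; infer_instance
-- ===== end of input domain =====

-- B replaces A's LSB-first decode loops, right-pad-then-reverse strings and nested index/int()/max() loops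
-- by an MSB-first recursive renderer with zfill/slice and a per-row zip comprehension (idiomatic; return value only).


-- ===== PORT A =====
-- 'while num>0: bin_ += str(num%2); num = num//2'
def decodeLoop (num : Int) (bin_ : String) : String :=
  if _h : 0 < num then
    decodeLoop (PySem.Int.floordiv num 2) (bin_ ++ PySem.Int.toStr (PySem.Int.mod num 2))
  else bin_
termination_by num.toNat
decreasing_by
  rw [PySem.Int.floordiv_eq_ediv_of_pos (by norm_num)]; omega

-- 'while len(bin_)<n: bin_ += "0"'
def padLoop (n : Int) (bin_ : String) : String :=
  if _h : PySem.Str.len bin_ < n then padLoop n (bin_ ++ "0") else bin_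
termination_by (n - PySem.Str.len bin_).toNat
decreasing_by
  rw [PySem.Str.len_append]
  have : PySem.Str.len "0" = 1 := by decide
  omega

-- one element pushed onto bin_arr1/bin_arr2: bin_[::-1] after both while loops
def encode (n num : Int) : String :=
  (PySem.Str.slice? (padLoop n (decodeLoop num "")) none none (-1)).getD ""

def solution (n : Int) (arr1 : List Int) (arr2 : List Int) : List String :=
  let answer := PySem.List.pyRepeat [""] n
  let bin_arr1 := arr1.map (fun num => encode n num)
  let bin_arr2 := arr2.map (fun num => encode n num)
  (PySem.List.pyRange 0 n).foldl (fun answer i =>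
    PySem.List.pySetD answer i
      ((PySem.List.pyRange 0 n).foldl (fun acc j =>
        -- bin_arr1[i][j] raises IndexError out of range (excluded by Pre_); the '.getD' defaults are unreachable there
        let c1 := (PySem.Str.pyGet? (PySem.List.pyGetD bin_arr1 i "") j).getD ' '
        let c2 := (PySem.Str.pyGet? (PySem.List.pyGetD bin_arr2 i "") j).getD ' '
        if max ((PySem.Int.ofStr? (String.ofList [c1])).getD 0)
               ((PySem.Int.ofStr? (String.ofList [c2])).getD 0) = 1 then
          acc ++ "#"
        else acc ++ " ")
        (PySem.List.pyGetD answer i "")))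
    answer

-- ===== PORT B =====
-- 'def bits(a): return bits(a // 2) + str(a % 2) if a > 0 else ""'
def bits (a : Int) : String :=
  if _h : 0 < a then bits (PySem.Int.floordiv a 2) ++ PySem.Int.toStr (PySem.Int.mod a 2) else ""
termination_by a.toNat
decreasing_by
  rw [PySem.Int.floordiv_eq_ediv_of_pos (by norm_num)]; omega

-- 'def row(a, b)' of Source B; the generator's one-char pieces are joined by "".join
def rowAlt (n a b : Int) : String :=
  let sa := PySem.Str.slice (PySem.Str.zfill (bits a) n) none (some n)
  let sb := PySem.Str.slice (PySem.Str.zfill (bits b) n) none (some n)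
  PySem.Str.join "" ((sa.toList.zip sb.toList).map (fun p =>
    if p.1 = '1' ∨ p.2 = '1' then "#" else " "))

def solution_alt (n : Int) (arr1 : List Int) (arr2 : List Int) : List String :=
  (PySem.List.pyRange 0 n).map (fun i =>
    rowAlt n (PySem.List.pyGetD arr1 i 0) (PySem.List.pyGetD arr2 i 0))

-- ===== PRECONDITION & SPEC =====
-- Both A and B raise IndexError iff n exceeds the length of arr1 or arr2 (for n ≤ 0 neither indexes anything).
def Pre_solution (n : Int) (arr1 : List Int) (arr2 : List Int) : Prop :=
  n ≤ (arr1.length : Int) ∧ n ≤ (arr2.length : Int)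
instance (n : Int) (arr1 : List Int) (arr2 : List Int) : Decidable (Pre_solution n arr1 arr2) := by
  unfold Pre_solution; infer_instance

def pvWitness_solution : Int × List Int × List Int := (2, [9, 20], [30, 1])

def Spec_solution (n : Int) (arr1 : List Int) (arr2 : List Int) (out : List String) : Prop :=
  out = solution_alt n arr1 arr2
instance (n : Int) (arr1 : List Int) (arr2 : List Int) (out : List String) : Decidable (Spec_solution n arr1 arr2 out) := by
  unfold Spec_solution; infer_instance

-- ===== CLAIM (what is proved, stated in full; the proofs are below) =====
def Claim_equal_solution : Prop := ∀ (n : Int) (arr1 : List Int) (arr2 : List Int), Dom_solution n arr1 arr2 → Pre_solution n arr1 arr2 → Spec_solution n arr1 arr2 (solution n arr1 arr2)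

-- ===== LEMMAS AND PROOFS =====

lemma mod2_cases (a : Int) : PySem.Int.mod a 2 = 0 ∨ PySem.Int.mod a 2 = 1 := by
  have h1 := PySem.Int.mod_nonneg a (b := 2) (by norm_num)
  have h2 := PySem.Int.mod_lt a (b := 2) (by norm_num)
  omega
lemma bits01 (a : Int) : ∀ c ∈ (bits a).toList, c = '0' ∨ c = '1' := by
  fun_induction bits a with
  | case1 a h ih =>
    intro c hc
    rw [String.toList_append] at hc
    rcases List.mem_append.1 hc with h' | h'
    · exact ih c h'
    · rcases mod2_cases a with hm | hm <;> rw [hm] at h'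
      · left; simpa [show (PySem.Int.toStr 0) = "0" from by decide] using h'
      · right; simpa [show (PySem.Int.toStr 1) = "1" from by decide] using h'
  | case2 a h => intro c hc; simp at hc

lemma decode_toList (a : Int) (s : String) :
    (decodeLoop a s).toList = s.toList ++ (bits a).toList.reverse := by
  fun_induction decodeLoop a s with
  | case1 a s h ih =>
    rw [ih, show bits a = bits (PySem.Int.floordiv a 2) ++ PySem.Int.toStr (PySem.Int.mod a 2) from by rw [bits]; exact dif_pos h]
    rcases mod2_cases a with hm | hm <;>
      rw [PySem.Int.mod_eq_emod_of_pos (by norm_num)] at hm <;>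
      simp [hm, String.toList_append, show (PySem.Int.toStr 0) = "0" from by decide,
        show (PySem.Int.toStr 1) = "1" from by decide]
  | case2 a s h => rw [bits, dif_neg h]; simp

lemma pad_toList (n : Int) (b : String) :
    (padLoop n b).toList = b.toList ++ List.replicate (n.toNat - b.toList.length) '0' := by
  fun_induction padLoop n b with
  | case1 b h ih =>
    have h0 : ("0" : String).toList = ['0'] := by decide
    rw [ih, String.toList_append, h0, List.length_append, List.length_singleton]
    rw [PySem.Str.len_eq] at h
    have e : n.toNat - b.toList.length = (n.toNat - (b.toList.length + 1)) + 1 := by omega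
    rw [e, List.replicate_succ, List.append_assoc, List.singleton_append]
  | case2 b h =>
    rw [PySem.Str.len_eq] at h
    have e : n.toNat - b.toList.length = 0 := by omega
    rw [e]
    simp

lemma encode_toList (n a : Int) :
    (encode n a).toList
      = List.replicate (n.toNat - (bits a).toList.length) '0' ++ (bits a).toList := by
  unfold encode
  rw [PySem.Str.slice?_none_none_neg_one]
  simp only [Option.getD_some, String.toList_ofList]
  rw [pad_toList, decode_toList]
  simp

lemma encode_len (n a : Int) :
    (encode n a).toList.length = max (bits a).toList.length n.toNat := by
  simp [encode_toList]; omega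

lemma encode01 (n a : Int) : ∀ c ∈ (encode n a).toList, c = '0' ∨ c = '1' := by
  intro c hc
  rw [encode_toList] at hc
  rcases List.mem_append.1 hc with h | h
  · exact Or.inl (List.eq_of_mem_replicate h)
  · exact bits01 a c h

lemma zfill01 (cs : List Char) (h : ∀ c ∈ cs, c = '0' ∨ c = '1') (w : Int) :
    PySem.Chars.zfill cs w = List.replicate (w.toNat - cs.length) '0' ++ cs := by
  unfold PySem.Chars.zfill
  split_ifs with hw
  · have : w.toNat - cs.length = 0 := by omega
    simp [this]
  · match cs with
    | [] => simp
    | c :: rest =>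
      have hc := h c (List.mem_cons_self ..)
      have : ¬ (c = '+' ∨ c = '-') := by rcases hc with h | h <;> subst h <;> decide
      simp [this]

lemma salt_toList (n a : Int) (hn : 0 ≤ n) :
    (PySem.Str.slice (PySem.Str.zfill (bits a) n) none (some n)).toList
      = ((encode n a).toList).take n.toNat := by
  rw [encode_toList]
  · rw [show (n = ((n.toNat : Nat) : Int)) from by omega]
    simp only [PySem.Str.slice]
    rw [String.toList_ofList]
    simp only [PySem.Chars.slice]
    rw [PySem.List.slice_to_natCast]
    rw [PySem.Str.toList_zfill, zfill01 _ (bits01 a)]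
    simp
    omega

lemma fold_append_hash (P : Int → Prop) [DecidablePred P] (l : List Int) (init : String) :
    (l.foldl (fun acc j => if P j then acc ++ "#" else acc ++ " ") init).toList
      = init.toList ++ l.map (fun j => if P j then '#' else ' ') := by
  induction l generalizing init with
  | nil => simp
  | cons x t ih =>
    simp only [List.foldl_cons, List.map_cons]
    by_cases hx : P x <;>
      simp [hx, ih, String.toList_append, show ("#" : String).toList = ['#'] from by decide,
        show (" " : String).toList = [' '] from by decide]

lemma join_pieces {α : Type} (f : α → String) (g : α → Char)
    (hfg : ∀ x, (f x).toList = [g x]) (l : List α) :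
    (PySem.Str.join "" (l.map f)).toList = l.map g := by
  simp only [PySem.Str.join, String.toList_ofList, PySem.Chars.join]
  induction l with
  | nil => simp [List.intercalate]
  | cons x t ih => cases t <;> simp_all [List.intercalate]

lemma outer_fold (F : Int → String → String) (m : Nat) (ans : List String) (hm : m ≤ ans.length) :
    (PySem.List.pyRange 0 (m : Int)).foldl
        (fun ans i => PySem.List.pySetD ans i (F i (PySem.List.pyGetD ans i ""))) ans
      = (List.range m).map (fun (k : Nat) => F (k : Int) (ans.getD k "")) ++ ans.drop m := by
  induction m with
  | zero => simp
  | succ p ih =>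
    have hp : p ≤ ans.length := Nat.le_of_succ_le hm
    have hsplit : PySem.List.pyRange 0 ((p + 1 : Nat) : Int)
        = PySem.List.pyRange 0 (p : Int) ++ [(p : Int)] := by
      rw [show (((p + 1 : Nat)) : Int) = (p : Int) + 1 from by push_cast; ring]
      exact PySem.List.pyRange_one_succ_right (by positivity)
    rw [hsplit, List.foldl_append, ih hp]
    set prev := (List.range p).map (fun (k : Nat) => F (k : Int) (ans.getD k "")) ++ ans.drop p with hprev
    have hlenmap : ((List.range p).map (fun (k : Nat) => F (k : Int) (ans.getD k ""))).length = p := by simp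
    have hgd : prev.getD p "" = ans.getD p "" := by
      rw [hprev]
      rw [List.getD, List.getElem?_append_right (by simp)]
      rw [hlenmap, List.getElem?_drop]
      simp [List.getD]
    have hdropcons : ans.drop p = ans.getD p "" :: ans.drop (p + 1) := by
      rw [List.drop_eq_getElem_cons (by omega)]
      simp [List.getD, List.getElem?_eq_getElem (by omega : p < ans.length)]
    simp only [List.foldl_cons, List.foldl_nil]
    rw [PySem.List.pyGetD_natCast, hgd, PySem.List.pySetD_natCast]
    rw [hprev, hdropcons]
    rw [List.set_append_right _ _ (by omega)]
    rw [List.range_succ, List.map_append]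
    simp

set_option maxHeartbeats 1000000 in
lemma row_eq (n a b : Int) (hn : 0 < n) :
    (PySem.List.pyRange 0 n).foldl (fun acc j =>
        if max ((PySem.Int.ofStr? (String.ofList [(PySem.Str.pyGet? (encode n a) j).getD ' '])).getD 0)
               ((PySem.Int.ofStr? (String.ofList [(PySem.Str.pyGet? (encode n b) j).getD ' '])).getD 0) = 1
        then acc ++ "#" else acc ++ " ") ""
      = rowAlt n a b := by
  apply String.toList_inj.mp
  rw [fold_append_hash]
  rw [show ("" : String).toList = [] from by decide, List.nil_append]
  simp only [rowAlt]
  rw [join_pieces (fun (p : Char × Char) => if p.1 = '1' ∨ p.2 = '1' then "#" else " ")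
    (fun (p : Char × Char) => if p.1 = '1' ∨ p.2 = '1' then '#' else ' ')
    (fun p => by dsimp only; split <;> decide)]
  rw [salt_toList n a (by omega), salt_toList n b (by omega)]
  set m := n.toNat with hm
  have hn' : (n : Int) = (m : Int) := by omega
  rw [hn', PySem.List.pyRange_zero_nat, List.map_map]
  have hl1 : (encode ((m : Nat) : Int) a).toList.length = max (bits a).toList.length m := by
    simpa using encode_len ((m : Nat) : Int) a
  have hl2 : (encode ((m : Nat) : Int) b).toList.length = max (bits b).toList.length m := by
    simpa using encode_len ((m : Nat) : Int) b
  apply List.ext_getElem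
  · simp only [List.length_map, List.length_range, List.length_zip, List.length_take]
    omega
  · intro j hj hj'
    have hjm : j < m := by simpa using hj
    have hj1 : j < (encode ((m : Nat) : Int) a).toList.length := by omega
    have hj2 : j < (encode ((m : Nat) : Int) b).toList.length := by omega
    simp only [List.getElem_map, List.getElem_range, Function.comp_apply]
    rw [List.getElem_zip]
    simp only [List.getElem_take]
    have hg1 : PySem.Str.pyGet? (encode ((m : Nat) : Int) a) (j : Int) = some ((encode ((m : Nat) : Int) a).toList[j]) := by
      simp only [PySem.Str.pyGet?, PySem.Chars.pyGet?]
      rw [PySem.List.pyGet?_natCast]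
      exact List.getElem?_eq_getElem hj1
    have hg2 : PySem.Str.pyGet? (encode ((m : Nat) : Int) b) (j : Int) = some ((encode ((m : Nat) : Int) b).toList[j]) := by
      simp only [PySem.Str.pyGet?, PySem.Chars.pyGet?]
      rw [PySem.List.pyGet?_natCast]
      exact List.getElem?_eq_getElem hj2
    rw [hg1, hg2]
    rcases encode01 ((m : Nat) : Int) a _ (List.getElem_mem hj1) with h1 | h1 <;>
      rcases encode01 ((m : Nat) : Int) b _ (List.getElem_mem hj2) with h2 | h2 <;>
      rw [h1, h2] <;> decide

theorem main_eq (n : Int) (arr1 arr2 : List Int)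
    (h1 : n ≤ (arr1.length : Int)) (h2 : n ≤ (arr2.length : Int)) :
    solution n arr1 arr2 = solution_alt n arr1 arr2 := by
  by_cases hn : n ≤ 0
  · have hr : PySem.List.pyRange 0 n = [] := PySem.List.pyRange_one_eq_nil hn
    simp [solution, solution_alt, hr, PySem.List.pyRepeat_singleton, Int.toNat_of_nonpos hn]
  · rw [not_le] at hn
    obtain ⟨m, rfl⟩ : ∃ m : Nat, n = (m : Int) := ⟨n.toNat, by omega⟩
    simp only [solution, solution_alt, PySem.List.pyRepeat_singleton, Int.toNat_natCast]
    rw [outer_fold (fun i s => List.foldl (fun acc j =>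
          if max ((PySem.Int.ofStr? (String.ofList [(PySem.Str.pyGet?
                    (PySem.List.pyGetD (List.map (fun num => encode ((m : Nat) : Int) num) arr1) i "") j).getD ' '])).getD 0)
                 ((PySem.Int.ofStr? (String.ofList [(PySem.Str.pyGet?
                    (PySem.List.pyGetD (List.map (fun num => encode ((m : Nat) : Int) num) arr2) i "") j).getD ' '])).getD 0) = 1
          then acc ++ "#" else acc ++ " ") s (PySem.List.pyRange 0 ((m : Nat) : Int)))
        m (List.replicate m "") (by simp)]
    conv_rhs => rw [PySem.List.pyRange_zero_nat, List.map_map]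
    simp only [List.drop_replicate, Nat.sub_self, List.replicate_zero, List.append_nil]
    apply List.map_congr_left
    intro k hk
    have hkm : k < m := List.mem_range.mp hk
    have hk1 : k < arr1.length := by omega
    have hk2 : k < arr2.length := by omega
    simp only [Function.comp_apply]
    have hget : (List.replicate m "").getD k "" = "" := by
      simp [List.getD, hkm]
    rw [hget]
    have e1 : PySem.List.pyGetD (List.map (fun num => encode ((m : Nat) : Int) num) arr1) (k : Int) ""
        = encode ((m : Nat) : Int) (arr1[k]) := by
      rw [PySem.List.pyGetD_natCast, List.getD, List.getElem?_map,
        List.getElem?_eq_getElem hk1]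
      rfl
    have e2 : PySem.List.pyGetD (List.map (fun num => encode ((m : Nat) : Int) num) arr2) (k : Int) ""
        = encode ((m : Nat) : Int) (arr2[k]) := by
      rw [PySem.List.pyGetD_natCast, List.getD, List.getElem?_map,
        List.getElem?_eq_getElem hk2]
      rfl
    have eb1 : PySem.List.pyGetD arr1 (k : Int) 0 = arr1[k] := by
      rw [PySem.List.pyGetD_natCast, List.getD, List.getElem?_eq_getElem hk1]
      rfl
    have eb2 : PySem.List.pyGetD arr2 (k : Int) 0 = arr2[k] := by
      rw [PySem.List.pyGetD_natCast, List.getD, List.getElem?_eq_getElem hk2]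
      rfl
    rw [e1, e2, eb1, eb2]
    exact row_eq _ _ _ hn

-- ===== VERDICT (by name: the statement is the Claim_ definition above) =====
theorem solution_spec : Claim_equal_solution := by
  intro n arr1 arr2 _hdom hpre
  unfold Spec_solution
  exact main_eq n arr1 arr2 hpre.1 hpre.2
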